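-- pv_equiv track=rewrite | github.com/cmajorsolo/Python_Algorithms | Codility100PercentPerformanceAnswers/ChocolatesByNumbers.py | solution
-- ===== SOURCE A (Python) =====
-- def solution(N, M):
--     resultArr = [0]
--     startWith = 0
--     loopTime = N
--
--     while loopTime > 0:
--         startWith = (startWith + M) % N
--         if startWith in resultArr:
--             return resultArr
--
--         resultArr.append(startWith)
--         loopTime -= 1
-- ===== SOURCE B (Python) =====
-- def _gcd(a, b):
--     while b:
--         a, b = b, a % b
--     return a
--
--
-- def solution(N, M):
--     g = _gcd(N, M % N)
--     return [(i * M) % N for i in range(N // g)]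
-- ===== Notes on version B (the rewrite author's own statement) =====
-- stated objective: faster
-- what changed: Replaces A's step-by-step simulation with a membership scan of the growing list by the number-theoretic closed form: cycle length L = N // gcd(N, M % N), returning [(i*M) % N for i in range(L)] directly.
-- outside the precondition, e.g. on solution(0, 5): A returns None, B raises ZeroDivisionError; on solution(-3, 2): A returns None, B returns [0, -1, -2]
import Mathlib
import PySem

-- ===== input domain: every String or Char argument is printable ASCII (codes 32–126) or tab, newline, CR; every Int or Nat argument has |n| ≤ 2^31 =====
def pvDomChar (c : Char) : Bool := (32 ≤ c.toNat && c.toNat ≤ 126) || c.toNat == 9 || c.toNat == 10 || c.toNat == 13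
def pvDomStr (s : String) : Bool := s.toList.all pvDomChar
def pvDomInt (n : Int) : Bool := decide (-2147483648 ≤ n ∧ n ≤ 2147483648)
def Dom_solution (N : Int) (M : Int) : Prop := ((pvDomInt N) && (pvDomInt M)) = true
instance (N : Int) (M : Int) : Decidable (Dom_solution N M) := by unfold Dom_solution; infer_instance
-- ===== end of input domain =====

-- B replaces A's step-by-step orbit simulation (a linear membership scan per step)
-- by the closed-form cycle length N // gcd(N, M % N) and a direct comprehension.
-- ===== PORT A =====
-- A's while loop; fuel = loopTime (starts at N, decremented by 1 each pass)
def solAux (N M : Int) (resultArr : List Int) (startWith : Int) : Nat → List Int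
  | 0 => resultArr  -- Python A returns None when the loop exhausts (only N ≤ 0); outside Pre_solution
  | fuel + 1 =>
    let s := PySem.Int.mod (startWith + M) N
    if s ∈ resultArr then resultArr
    else solAux N M (resultArr ++ [s]) s fuel

def solution (N : Int) (M : Int) : List Int :=
  solAux N M [0] 0 N.toNat

-- ===== PORT B =====
-- Euclid's loop `while b: a, b = b, a % b` from Source B (Python floor mod)
def altGcd (a b : Int) : Int :=
  if h : b ≠ 0 then altGcd b (PySem.Int.mod a b) else a
termination_by b.natAbs
decreasing_by
  rcases lt_or_gt_of_ne h with hb | hb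
  · have := PySem.Int.mod_neg_bounds a hb; omega
  · have h1 := PySem.Int.mod_nonneg a hb; have h2 := PySem.Int.mod_lt a hb; omega

def solution_alt (N : Int) (M : Int) : List Int :=
  let g := altGcd N (PySem.Int.mod M N)
  (PySem.List.pyRange 0 (PySem.Int.floordiv N g) 1).map (fun i => PySem.Int.mod (i * M) N)

-- ===== PRECONDITION & SPEC =====
-- Pre_ excludes N ≤ 0: there A's while loop never runs and A falls off the end returning
-- None, which is not a value of the declared list type (B raises for N = 0, else returns).
def Pre_solution (N : Int) (M : Int) : Prop := 1 ≤ N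
instance (N : Int) (M : Int) : Decidable (Pre_solution N M) := by unfold Pre_solution; infer_instance
def pvWitness_solution : Int × Int := (6, 4)

def Spec_solution (N : Int) (M : Int) (out : List Int) : Prop := out = solution_alt N M
instance (N : Int) (M : Int) (out : List Int) : Decidable (Spec_solution N M out) := by unfold Spec_solution; infer_instance

-- ===== CLAIM (what is proved, stated in full; the proofs are below) =====
def Claim_equal_solution : Prop := ∀ (N : Int) (M : Int), Dom_solution N M → Pre_solution N M → Spec_solution N M (solution N M)

-- ===== LEMMAS AND PROOFS =====

-- the k-th visited chocolate, in Nat form (n = N.toNat, m = (M % N).toNat)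
def norb (n m k : Nat) : Nat := k * m % n

-- Euclid's loop on nonnegative ints computes Nat.gcd
theorem altGcd_eq_gcd (a b : Int) (ha : 0 ≤ a) (hb : 0 ≤ b) :
    altGcd a b = (Nat.gcd b.toNat a.toNat : Int) := by
  by_cases h : b = 0
  · subst h; rw [altGcd]; simp [Int.toNat_of_nonneg ha]
  · have hbpos : 0 < b := lt_of_le_of_ne hb (Ne.symm h)
    rw [altGcd]
    simp only [h, ne_eq, not_false_eq_true, dite_true]
    have hmn : 0 ≤ PySem.Int.mod a b := PySem.Int.mod_nonneg a hbpos
    rw [altGcd_eq_gcd b (PySem.Int.mod a b) hb hmn]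
    congr 1
    rw [PySem.Int.mod_eq_emod_of_pos hbpos]
    have hab : (a % b).toNat = a.toNat % b.toNat := by
      obtain ⟨x, rfl⟩ := Int.eq_ofNat_of_zero_le ha
      obtain ⟨y, rfl⟩ := Int.eq_ofNat_of_zero_le hb
      simp only [Int.toNat_natCast]
      rw [← Int.natCast_mod, Int.toNat_natCast]
    rw [hab, Nat.gcd_rec b.toNat a.toNat]
termination_by b.toNat
decreasing_by
  have h1 := PySem.Int.mod_nonneg a hbpos; have h2 := PySem.Int.mod_lt a hbpos; omega

-- the Int orbit element i*M % N equals the Nat orbit element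
lemma orb_eq_norb (N M : Int) (hN : 1 ≤ N) (k : Nat) :
    PySem.Int.mod ((k : Int) * M) N = (norb N.toNat (PySem.Int.mod M N).toNat k : Int) := by
  have hNpos : (0:Int) < N := by omega
  rw [PySem.Int.mod_eq_emod_of_pos hNpos, PySem.Int.mod_eq_emod_of_pos hNpos]
  have hm0 : 0 ≤ M % N := Int.emod_nonneg M (by omega)
  have hmc : ((M % N).toNat : Int) = M % N := Int.toNat_of_nonneg hm0
  have hnc : (N.toNat : Int) = N := Int.toNat_of_nonneg (by omega)
  unfold norb
  push_cast
  rw [hmc, hnc]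
  conv_lhs => rw [Int.mul_emod]
  conv_rhs => rw [Int.mul_emod]
  rw [Int.emod_emod_of_dvd M dvd_rfl]

-- the orbit returns to 0 after L = n / gcd n m steps
lemma norb_L (n m : Nat) (hn : 0 < n) : norb n m (n / Nat.gcd n m) = 0 := by
  unfold norb
  set g := Nat.gcd n m with hgdef
  have hg : 0 < g := Nat.gcd_pos_of_pos_left m hn
  obtain ⟨n', hn'⟩ : g ∣ n := Nat.gcd_dvd_left n m
  obtain ⟨m', hm'⟩ : g ∣ m := Nat.gcd_dvd_right n m
  have hL : n / g = n' := by rw [hn']; exact Nat.mul_div_cancel_left n' hg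
  rw [hL]
  have h2 : n' * m = n * m' := by rw [hm', hn']; ring
  rw [h2, Nat.mul_mod_right]

-- orbit elements are pairwise distinct before step L
lemma norb_inj (n m : Nat) (hn : 0 < n) {i j : Nat}
    (hij : i < j) (hj : j < n / Nat.gcd n m) : norb n m i ≠ norb n m j := by
  intro heq
  unfold norb at heq
  set g := Nat.gcd n m with hgdef
  have hg : 0 < g := Nat.gcd_pos_of_pos_left m hn
  obtain ⟨n', hn'⟩ : g ∣ n := Nat.gcd_dvd_left n m
  obtain ⟨m', hm'⟩ : g ∣ m := Nat.gcd_dvd_right n m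
  have hL : n / g = n' := by rw [hn']; exact Nat.mul_div_cancel_left n' hg
  have hM : m / g = m' := by rw [hm']; exact Nat.mul_div_cancel_left m' hg
  have hdvd : n ∣ (j - i) * m := by
    have hle : i * m ≤ j * m := Nat.mul_le_mul_right m (le_of_lt hij)
    have h3 := (Nat.modEq_iff_dvd' hle).mp (show Nat.ModEq n (i * m) (j * m) from heq)
    rwa [← Nat.sub_mul] at h3
  have hdvd' : n' ∣ (j - i) * m' := by
    rcases hdvd with ⟨c, hc⟩
    refine ⟨c, ?_⟩
    apply Nat.eq_of_mul_eq_mul_left hg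
    calc g * ((j - i) * m') = (j - i) * (g * m') := by ring
      _ = n * c := by rw [← hm']; exact hc
      _ = g * (n' * c) := by rw [hn']; ring
  have hcop : Nat.Coprime n' m' := by
    have h4 := Nat.coprime_div_gcd_div_gcd (m := n) (n := m) hg
    rwa [hL, hM] at h4
  have hdj : n' ∣ j - i := hcop.dvd_of_dvd_mul_right hdvd'
  have hpos : 0 < j - i := by omega
  have h5 := Nat.le_of_dvd hpos hdj
  omega

-- one loop step of A advances the orbit index by one
lemma norb_step (N M : Int) (hN : 1 ≤ N) (k : Nat) (hk : 1 ≤ k) :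
    PySem.Int.mod ((norb N.toNat (PySem.Int.mod M N).toNat (k - 1) : Int) + M) N
      = (norb N.toNat (PySem.Int.mod M N).toNat k : Int) := by
  rw [← orb_eq_norb N M hN (k - 1), ← orb_eq_norb N M hN k]
  have hNpos : (0:Int) < N := by omega
  rw [PySem.Int.mod_eq_emod_of_pos hNpos, PySem.Int.mod_eq_emod_of_pos hNpos,
      PySem.Int.mod_eq_emod_of_pos hNpos, Int.emod_add_emod]
  congr 1
  have : ((k - 1 : Nat) : Int) = (k : Int) - 1 := by omega
  rw [this]; ring

-- loop invariant for A: after k-1 appends the list is the first k orbit elements,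
-- and the loop finishes with the first L of them
lemma solAux_eq (N M : Int) (hN : 1 ≤ N) :
    ∀ (t k : Nat), 1 ≤ k → k + t = N.toNat / Nat.gcd N.toNat (PySem.Int.mod M N).toNat →
      solAux N M
        ((List.range k).map (fun i => (norb N.toNat (PySem.Int.mod M N).toNat i : Int)))
        ((norb N.toNat (PySem.Int.mod M N).toNat (k - 1) : Int)) (N.toNat - (k - 1))
      = (List.range (N.toNat / Nat.gcd N.toNat (PySem.Int.mod M N).toNat)).map
          (fun i => (norb N.toNat (PySem.Int.mod M N).toNat i : Int)) := by
  have hNpos : (0:Int) < N := by omega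
  set n := N.toNat with hn
  set m := (PySem.Int.mod M N).toNat with hmdef
  have hn1 : 1 ≤ n := by omega
  have hmlt : m < n := by
    have h1 := PySem.Int.mod_lt M hNpos
    have h2 := PySem.Int.mod_nonneg M hNpos
    omega
  set L := n / Nat.gcd n m with hL
  have hLn : L ≤ n := Nat.div_le_self n _
  intro t
  induction t with
  | zero =>
    intro k hk1 hkL
    have hkeq : k = L := by omega
    have hfuel : n - (k - 1) = (n - k) + 1 := by omega
    rw [hfuel]
    rw [solAux]
    rw [norb_step N M hN k hk1]
    have hmem : (norb n m k : Int) ∈ (List.range k).map (fun i => (norb n m i : Int)) := by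
      have h0 : norb n m k = norb n m 0 := by
        rw [hkeq, hL, norb_L n m (by omega)]
        simp [norb]
      rw [h0]
      exact List.mem_map.mpr ⟨0, List.mem_range.mpr (by omega), rfl⟩
    rw [if_pos hmem, hkeq]
  | succ t ih =>
    intro k hk1 hkL
    have hkL' : k < L := by omega
    have hfuel : n - (k - 1) = (n - k) + 1 := by omega
    rw [hfuel]
    rw [solAux]
    rw [norb_step N M hN k hk1]
    have hmem : (norb n m k : Int) ∉ (List.range k).map (fun i => (norb n m i : Int)) := by
      intro hmem
      obtain ⟨i, hi, hii⟩ := List.mem_map.mp hmem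
      have : norb n m i = norb n m k := by exact_mod_cast hii
      exact norb_inj n m (by omega) (List.mem_range.mp hi) hkL' this
    rw [if_neg hmem]
    have harr : (List.range k).map (fun i => (norb n m i : Int)) ++ [(norb n m k : Int)]
        = (List.range (k + 1)).map (fun i => (norb n m i : Int)) := by
      rw [List.range_succ, List.map_append]; rfl
    rw [harr]
    have h1 : (norb n m k : Int) = (norb n m (k + 1 - 1) : Int) := by simp
    have h2 : n - k = n - (k + 1 - 1) := by omega
    rw [h1, h2]
    exact ih (k + 1) (by omega) (by omega)

theorem solution_eq_alt (N M : Int) (hPre : 1 ≤ N) : solution N M = solution_alt N M := by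
  have hNpos : (0:Int) < N := by omega
  have hm0 : 0 ≤ PySem.Int.mod M N := PySem.Int.mod_nonneg M hNpos
  have hgcd : altGcd N (PySem.Int.mod M N)
      = (Nat.gcd N.toNat (PySem.Int.mod M N).toNat : Int) := by
    rw [altGcd_eq_gcd N (PySem.Int.mod M N) (by omega) hm0, Nat.gcd_comm]
  have hfd : PySem.Int.floordiv N ((Nat.gcd N.toNat (PySem.Int.mod M N).toNat : Nat) : Int)
      = ((N.toNat / Nat.gcd N.toNat (PySem.Int.mod M N).toNat : Nat) : Int) := by
    have h := PySem.Int.floordiv_natCast N.toNat (Nat.gcd N.toNat (PySem.Int.mod M N).toNat)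
    rwa [Int.toNat_of_nonneg (le_of_lt hNpos)] at h
  have hrhs : solution_alt N M
      = (List.range (N.toNat / Nat.gcd N.toNat (PySem.Int.mod M N).toNat)).map
          (fun i => (norb N.toNat (PySem.Int.mod M N).toNat i : Int)) := by
    unfold solution_alt
    dsimp only
    rw [hgcd, hfd, PySem.List.pyRange_one]
    simp only [sub_zero, Int.toNat_natCast, List.map_map]
    apply List.map_congr_left
    intro k hk
    simp only [Function.comp]
    rw [show ((0:Int) + (k:Int)) = (k:Int) by ring, orb_eq_norb N M hPre k]
  rw [hrhs]
  have hL1 : 1 ≤ N.toNat / Nat.gcd N.toNat (PySem.Int.mod M N).toNat :=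
    Nat.div_pos (Nat.le_of_dvd (by omega) (Nat.gcd_dvd_left _ _))
      (Nat.gcd_pos_of_pos_left _ (by omega))
  have hinv := solAux_eq N M hPre
    (N.toNat / Nat.gcd N.toNat (PySem.Int.mod M N).toNat - 1) 1 (by omega) (by omega)
  unfold solution
  have h01 : (List.range 1).map (fun i => (norb N.toNat (PySem.Int.mod M N).toNat i : Int)) = [0] := by
    simp [norb]
  have h00 : ((norb N.toNat (PySem.Int.mod M N).toNat (1-1) : Nat) : Int) = 0 := by
    simp [norb]
  rw [h01, h00] at hinv
  simpa using hinv

-- ===== VERDICT (by name: the statement is the Claim_ definition above) =====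
theorem solution_spec : Claim_equal_solution := by
  intro N M _ hPre
  exact solution_eq_alt N M hPre
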